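-- pv_equiv track=rewrite | github.com/mmsm1381/python-exercise | odd_grasshoper.py | grass_hoper_function
-- ===== SOURCE A (Python) =====
-- def grass_hoper_function(x:int,n:int)->int:
--     current_jump = 1
--     while current_jump<=n:
--         if not x%2 or x==0:
--             x-=current_jump
--             current_jump+=1
--         else:
--             x+=current_jump
--             current_jump+=1
--     return x
-- ===== SOURCE B (Python) =====
-- def grass_hoper_function(x: int, n: int) -> int:
--     # O(1): every aligned block of four jumps cancels; only n % 4 leftover jumps matter.
--     if n < 1:
--         return x
--     b = n - n % 4
--     r = n % 4
--     if r == 1: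
--         d = -(b + 1)
--     elif r == 2:
--         d = 1
--     elif r == 3:
--         d = b + 4
--     else:
--         d = 0
--     return x + d if x % 2 == 0 else x - d
-- ===== Notes on version B (the rewrite author's own statement) =====
-- stated objective: faster
-- what changed: Replaced the jump-by-jump simulation loop with an O(1) closed form: every aligned block of four consecutive jumps cancels, so only the n % 4 leftover jumps (with sign fixed by x's parity) are added.
import Mathlib
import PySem

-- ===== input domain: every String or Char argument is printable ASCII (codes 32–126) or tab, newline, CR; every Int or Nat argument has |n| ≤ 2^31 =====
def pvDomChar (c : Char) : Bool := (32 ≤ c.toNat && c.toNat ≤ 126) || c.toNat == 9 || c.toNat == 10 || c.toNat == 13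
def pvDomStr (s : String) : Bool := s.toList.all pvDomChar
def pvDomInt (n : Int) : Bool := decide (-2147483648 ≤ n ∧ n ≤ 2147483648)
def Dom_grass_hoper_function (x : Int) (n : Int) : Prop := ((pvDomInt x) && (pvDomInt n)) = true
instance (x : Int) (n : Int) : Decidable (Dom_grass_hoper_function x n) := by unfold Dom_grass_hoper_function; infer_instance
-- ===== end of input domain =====

-- B replaces A's O(n) jump-by-jump loop with an O(1) closed form: aligned blocks of four jumps cancel, so only the n % 4 leftover jumps matter.

-- ===== PORT A =====
-- the while loop of A: state (x, current_jump); runs while current_jump ≤ n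
def grassLoop (n : Int) (x : Int) (j : Int) : Int :=
  if _h : j ≤ n then
    if PySem.Int.mod x 2 == 0 || x == 0 then grassLoop n (x - j) (j + 1)
    else grassLoop n (x + j) (j + 1)
  else x
termination_by (n + 1 - j).toNat
decreasing_by all_goals omega

def grass_hoper_function (x : Int) (n : Int) : Int := grassLoop n x 1

-- ===== PORT B =====
def grass_hoper_function_alt (x : Int) (n : Int) : Int :=
  if n < 1 then x
  else
    let b := n - PySem.Int.mod n 4
    let r := PySem.Int.mod n 4
    let d := if r = 1 then -(b + 1) else if r = 2 then 1 else if r = 3 then b + 4 else 0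
    if PySem.Int.mod x 2 = 0 then x + d else x - d

-- ===== PRECONDITION & SPEC =====
def Spec_grass_hoper_function (x : Int) (n : Int) (out : Int) : Prop := out = grass_hoper_function_alt x n
instance (x : Int) (n : Int) (out : Int) : Decidable (Spec_grass_hoper_function x n out) := by unfold Spec_grass_hoper_function; infer_instance

-- ===== CLAIM (what is proved, stated in full; the proofs are below) =====
def Claim_equal_grass_hoper_function : Prop := ∀ (x : Int) (n : Int), Dom_grass_hoper_function x n → Spec_grass_hoper_function x n (grass_hoper_function x n)

-- ===== LEMMAS AND PROOFS =====

theorem pvMod2 (x : Int) : PySem.Int.mod x 2 = x % 2 := PySem.Int.mod_eq_emod_of_pos (by omega)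
theorem pvMod4 (x : Int) : PySem.Int.mod x 4 = x % 4 := PySem.Int.mod_eq_emod_of_pos (by omega)

theorem loop_gt {n x j : Int} (h : n < j) : grassLoop n x j = x := by
  rw [grassLoop]; simp [show ¬ j ≤ n by omega]

theorem loop_le {n x j : Int} (h : j ≤ n) :
    grassLoop n x j =
      if x % 2 = 0 then grassLoop n (x - j) (j + 1) else grassLoop n (x + j) (j + 1) := by
  rw [grassLoop]
  by_cases hx : x % 2 = 0
  · simp [h, hx]
  · have hx0 : x ≠ 0 := by intro h0; omega
    simp [h, hx, hx0]

theorem loop_block {n x j : Int} (hodd : j % 2 = 1) (h : j + 3 ≤ n) :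
    grassLoop n x j = grassLoop n x (j + 4) := by
  have h2 : x % 2 = 0 ∨ x % 2 = 1 := by omega
  rcases h2 with hx | hx
  · rw [loop_le (by omega), if_pos hx,
      loop_le (by omega), if_neg (by omega),
      show x - j + (j + 1) = x + 1 by ring,
      loop_le (by omega), if_neg (by omega),
      show x + 1 + (j + 1 + 1) = x + j + 3 by ring,
      loop_le (by omega), if_pos (by omega),
      show x + j + 3 - (j + 1 + 1 + 1) = x by ring,
      show j + 1 + 1 + 1 + 1 = j + 4 by ring]
  · rw [loop_le (by omega), if_neg (by omega),
      loop_le (by omega), if_pos (by omega),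
      show x + j - (j + 1) = x - 1 by ring,
      loop_le (by omega), if_pos (by omega),
      show x - 1 - (j + 1 + 1) = x - j - 3 by ring,
      loop_le (by omega), if_neg (by omega),
      show x - j - 3 + (j + 1 + 1 + 1) = x by ring,
      show j + 1 + 1 + 1 + 1 = j + 4 by ring]

theorem loop_blocks (k : Nat) : ∀ (n x j : Int), j % 2 = 1 → j + 4 * (k : Int) ≤ n + 1 →
    grassLoop n x j = grassLoop n x (j + 4 * (k : Int)) := by
  induction k with
  | zero => intro n x j _ _; norm_num
  | succ m ih =>
      intro n x j hodd hle
      have hc : ((m + 1 : Nat) : Int) = (m : Int) + 1 := by push_cast; ring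
      rw [hc] at hle ⊢
      rw [loop_block hodd (by omega)]
      rw [ih n x (j + 4) (by omega) (by omega)]
      ring_nf

theorem grass_main (x n : Int) : grass_hoper_function x n = grass_hoper_function_alt x n := by
  unfold grass_hoper_function grass_hoper_function_alt
  by_cases hn : n < 1
  · rw [if_pos hn, loop_gt (by omega)]
  · rw [if_neg hn]
    simp only [pvMod2, pvMod4]
    set r := n % 4 with hr
    set b := n - n % 4 with hb
    have hq : 0 ≤ n - n % 4 := by omega
    have hk : (1 : Int) + 4 * (((n - n % 4) / 4).toNat : Int) = b + 1 := by omega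
    have := loop_blocks ((n - n % 4) / 4).toNat n x 1 (by omega) (by omega)
    rw [hk] at this
    rw [this]
    have hbe : b % 2 = 0 := by omega
    have hxp : x % 2 = 0 ∨ x % 2 = 1 := by omega
    have hr4 : r = 0 ∨ r = 1 ∨ r = 2 ∨ r = 3 := by omega
    rcases hr4 with h4 | h4 | h4 | h4 <;> rw [h4]
    · -- r = 0 : no steps remain (n = b)
      rw [loop_gt (by omega)]
      split_ifs <;> omega
    · -- r = 1 : one step remains
      rcases hxp with hx | hx
      · rw [loop_le (by omega), if_pos hx, loop_gt (by omega)]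
        split_ifs <;> omega
      · rw [loop_le (by omega), if_neg (by omega), loop_gt (by omega)]
        split_ifs <;> omega
    · -- r = 2
      rcases hxp with hx | hx
      · rw [loop_le (by omega), if_pos hx,
          loop_le (by omega), if_neg (by omega),
          show x - (b + 1) + (b + 1 + 1) = x + 1 by ring,
          loop_gt (by omega)]
        split_ifs <;> omega
      · rw [loop_le (by omega), if_neg (by omega),
          loop_le (by omega), if_pos (by omega),
          show x + (b + 1) - (b + 1 + 1) = x - 1 by ring,
          loop_gt (by omega)]
        split_ifs <;> omega
    · -- r = 3
      rcases hxp with hx | hx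
      · rw [loop_le (by omega), if_pos hx,
          loop_le (by omega), if_neg (by omega),
          show x - (b + 1) + (b + 1 + 1) = x + 1 by ring,
          loop_le (by omega), if_neg (by omega),
          show x + 1 + (b + 1 + 1 + 1) = x + (b + 4) by ring,
          loop_gt (by omega)]
        split_ifs <;> omega
      · rw [loop_le (by omega), if_neg (by omega),
          loop_le (by omega), if_pos (by omega),
          show x + (b + 1) - (b + 1 + 1) = x - 1 by ring,
          loop_le (by omega), if_pos (by omega),
          show x - 1 - (b + 1 + 1 + 1) = x - (b + 4) by ring,
          loop_gt (by omega)]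
        split_ifs <;> omega

-- ===== VERDICT (by name: the statement is the Claim_ definition above) =====
theorem grass_hoper_function_spec : Claim_equal_grass_hoper_function := by
  intro x n _
  exact grass_main x n
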